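-- pv_equiv track=rewrite | github.com/lhs961021/python_algorithm | programmers/level2/n^2배열자르기.py | solution
-- ===== SOURCE A (Python) =====
-- def solution(n, left, right):
--     answer = []
--
--     a = left//n
--     b = left%n
--     d = right-left
--
--     count = 0
--
--     while count!=(d+1):
--         answer.append(max(a+1,b+1))
--         if (b+1)==n:
--             b = 0
--             a += 1
--         else:
--             b+=1
--         count+=1
--
--     return answer
-- ===== SOURCE B (Python) =====
-- def solution(n, left, right):
--     answer = []
--     for a in range(left // n, right // n + 1):
--         lo = max(left - a * n, 0)
--         hi = min(right - a * n, n - 1)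
--         c = min(hi, a)
--         if c >= lo:
--             answer += [a + 1] * (c - lo + 1)
--         answer += list(range(max(lo, a + 1) + 1, hi + 2))
--     return answer
-- ===== Notes on version B (the rewrite author's own statement) =====
-- stated objective: alternative
-- what changed: B iterates over the grid ROWS intersecting [left,right] and emits each row's contribution as one constant block [a+1]*k plus one arithmetic run range(...), built by C-level list repetition/range, instead of A's per-index Python loop maintaining (a,b) with a wrap-around branch.
-- outside the precondition, e.g. on solution(-2, 0, 3): A returns [1, 2, 3, 4], B returns []; on solution(0, 0, 3): A raises ZeroDivisionError, B raises ZeroDivisionError; on solution(3, 5, 2): A does not finish within the time limit, B returns []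
import Mathlib
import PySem

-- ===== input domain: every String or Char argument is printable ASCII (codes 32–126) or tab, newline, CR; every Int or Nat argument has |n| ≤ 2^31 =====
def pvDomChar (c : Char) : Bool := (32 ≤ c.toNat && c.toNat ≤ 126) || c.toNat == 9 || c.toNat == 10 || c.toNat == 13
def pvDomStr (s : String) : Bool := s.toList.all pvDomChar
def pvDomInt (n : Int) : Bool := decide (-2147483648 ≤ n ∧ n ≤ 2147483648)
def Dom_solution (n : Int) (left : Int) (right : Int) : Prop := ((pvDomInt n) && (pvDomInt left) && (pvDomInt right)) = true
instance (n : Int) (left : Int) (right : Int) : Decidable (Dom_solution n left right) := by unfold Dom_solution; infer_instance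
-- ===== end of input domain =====

-- B replaces A's per-index loop with maintained (a,b) state and wrap-around branch by a loop
-- over the grid ROWS intersecting [left,right], emitting per row one constant block and one
-- arithmetic run (objective: alternative decomposition, same linear cost).


-- ===== PORT A =====
-- while loop: runs exactly (d+1).toNat times (count 0 .. d); fuel makes the port total
def solutionLoop (n : Int) : Int → Int → Nat → List Int
  | _, _, 0 => []
  | a, b, k+1 =>
      max (a + 1) (b + 1) ::
        (if b + 1 = n then solutionLoop n (a + 1) 0 k else solutionLoop n a (b + 1) k)

def solution (n : Int) (left : Int) (right : Int) : List Int :=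
  let a := PySem.Int.floordiv left n
  let b := PySem.Int.mod left n
  let d := right - left
  solutionLoop n a b (d + 1).toNat

-- ===== PORT B =====
def solution_alt (n : Int) (left : Int) (right : Int) : List Int :=
  (PySem.List.pyRange (PySem.Int.floordiv left n) (PySem.Int.floordiv right n + 1) 1).foldl
    (fun answer a =>
      let lo := max (left - a * n) 0
      let hi := min (right - a * n) (n - 1)
      let c := min hi a
      let answer := if c ≥ lo then answer ++ List.replicate (c - lo + 1).toNat (a + 1) else answer
      answer ++ PySem.List.pyRange (max lo (a + 1) + 1) (hi + 2) 1) []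

-- ===== PRECONDITION & SPEC =====
-- Pre_ excludes n = 0 (A raises ZeroDivisionError), right < left - 1 (A's while loop never
-- terminates), and n < 0, where A's wrap branch (b+1)==n can never fire so the values A returns
-- are an artefact of its incremental state rather than the problem's n*n-grid rule.
def Pre_solution (n : Int) (left : Int) (right : Int) : Prop := 0 < n ∧ left ≤ right + 1
instance (n : Int) (left : Int) (right : Int) : Decidable (Pre_solution n left right) := by unfold Pre_solution; infer_instance
def pvWitness_solution : Int × Int × Int := (3, 2, 5)
def Spec_solution (n : Int) (left : Int) (right : Int) (out : List Int) : Prop := out = solution_alt n left right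
instance (n : Int) (left : Int) (right : Int) (out : List Int) : Decidable (Spec_solution n left right out) := by unfold Spec_solution; infer_instance

-- ===== CLAIM (what is proved, stated in full; the proofs are below) =====
def Claim_equal_solution : Prop := ∀ (n : Int) (left : Int) (right : Int), Dom_solution n left right → Pre_solution n left right → Spec_solution n left right (solution n left right)

-- ===== LEMMAS AND PROOFS =====

-- the common yardstick both ports are reduced to: the flat-index value map
def pvF (n idx : Int) : Int := max (PySem.Int.floordiv idx n) (PySem.Int.mod idx n) + 1

-- one row's block of B, in purely arithmetic form
def pvG (n left right a : Int) : List Int :=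
  (if min (min (right - a * n) (n - 1)) a ≥ max (left - a * n) 0 then
      List.replicate (min (min (right - a * n) (n - 1)) a - max (left - a * n) 0 + 1).toNat (a + 1)
    else []) ++
  PySem.List.pyRange (max (max (left - a * n) 0) (a + 1) + 1) (min (right - a * n) (n - 1) + 2) 1

-- ---- A-side: the incremental loop equals the flat-index map ----

lemma divmod_succ_wrap (n l : Int) (hn : 0 < n) (h : PySem.Int.mod l n + 1 = n) :
    PySem.Int.floordiv (l + 1) n = PySem.Int.floordiv l n + 1 ∧ PySem.Int.mod (l + 1) n = 0 := by
  rw [PySem.Int.floordiv_eq_ediv_of_pos hn, PySem.Int.floordiv_eq_ediv_of_pos hn,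
      PySem.Int.mod_eq_emod_of_pos hn] at *
  have h1 := Int.mul_ediv_add_emod l n
  have e : l + 1 = n * (l / n + 1) := by rw [mul_add, mul_one]; omega
  have hm : (l + 1) % n = 0 := by rw [e]; exact Int.mul_emod_right n _
  have h2 := Int.mul_ediv_add_emod (l + 1) n
  have hc : n * ((l + 1) / n) = n * (l / n + 1) := by omega
  exact ⟨mul_left_cancel₀ (by omega) hc, hm⟩

lemma divmod_succ_nowrap (n l : Int) (hn : 0 < n) (h : PySem.Int.mod l n + 1 ≠ n) :
    PySem.Int.floordiv (l + 1) n = PySem.Int.floordiv l n ∧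
    PySem.Int.mod (l + 1) n = PySem.Int.mod l n + 1 := by
  rw [PySem.Int.floordiv_eq_ediv_of_pos hn, PySem.Int.floordiv_eq_ediv_of_pos hn,
      PySem.Int.mod_eq_emod_of_pos hn, PySem.Int.mod_eq_emod_of_pos hn] at *
  have hlt := Int.emod_lt_of_pos l hn
  have hge := Int.emod_nonneg l (by omega : n ≠ 0)
  have h1 := Int.mul_ediv_add_emod l n
  have e : l + 1 = (l % n + 1) + n * (l / n) := by omega
  have hm : (l + 1) % n = l % n + 1 := by
    rw [e, Int.add_mul_emod_self_left]
    exact Int.emod_eq_of_lt (by omega) (by omega)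
  have h2 := Int.mul_ediv_add_emod (l + 1) n
  have hc : n * ((l + 1) / n) = n * (l / n) := by omega
  exact ⟨mul_left_cancel₀ (by omega) hc, hm⟩

lemma loop_eq_map (n : Int) (hn : 0 < n) : ∀ (k : Nat) (l : Int),
    solutionLoop n (PySem.Int.floordiv l n) (PySem.Int.mod l n) k
      = (PySem.List.pyRange l (l + k) 1).map (pvF n) := by
  intro k
  induction k with
  | zero =>
      intro l
      rw [PySem.List.pyRange_one_eq_nil (by simp)]
      rfl
  | succ k ih =>
      intro l
      rw [PySem.List.pyRange_one_cons (by push_cast; omega), List.map_cons]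
      have harg : l + ((k : Int) + 1) = (l + 1) + k := by ring
      push_cast
      rw [harg]
      show max (PySem.Int.floordiv l n + 1) (PySem.Int.mod l n + 1) :: _ = _
      congr 1
      · unfold pvF; omega
      · by_cases h : PySem.Int.mod l n + 1 = n
        · obtain ⟨hd, hm⟩ := divmod_succ_wrap n l hn h
          rw [if_pos h, ← hd, ← hm, ih (l + 1)]
        · obtain ⟨hd, hm⟩ := divmod_succ_nowrap n l hn h
          rw [if_neg h, ← hd, ← hm, ih (l + 1)]

-- ---- B-side: the row blocks equal the flat-index map ----

-- divmod of an in-row flat index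
lemma divmod_row (n a b : Int) (hn : 0 < n) (hb0 : 0 ≤ b) (hbn : b < n) :
    PySem.Int.floordiv (a * n + b) n = a ∧ PySem.Int.mod (a * n + b) n = b := by
  rw [PySem.Int.floordiv_eq_ediv_of_pos hn, PySem.Int.mod_eq_emod_of_pos hn]
  constructor
  · rw [add_comm, Int.add_mul_ediv_right _ _ (by omega : n ≠ 0),
        Int.ediv_eq_zero_of_lt hb0 hbn, zero_add]
  · rw [add_comm, Int.add_mul_emod_self_right]
    exact Int.emod_eq_of_lt hb0 hbn

-- a map of a constant over a pyRange is a replicate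
lemma map_const_pyRange (x y c : Int) (f : Int → Int) (h : ∀ b, x ≤ b → b < y → f b = c) :
    (PySem.List.pyRange x y 1).map f = List.replicate (y - x).toNat c := by
  rw [List.map_congr_left (g := fun _ => c)
        (fun b hb => by
          rw [PySem.List.mem_pyRange_one] at hb
          exact h b hb.1 hb.2),
      List.map_const', PySem.List.length_pyRange_one]

-- a map of (·+1) over a pyRange shifts the range
lemma map_succ_pyRange (x y : Int) :
    (PySem.List.pyRange x y 1).map (fun b => b + 1) = PySem.List.pyRange (x + 1) (y + 1) 1 := by
  rw [PySem.List.pyRange_one, PySem.List.pyRange_one, List.map_map]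
  have : (y + 1 - (x + 1)).toNat = (y - x).toNat := by omega
  rw [this]
  exact List.map_congr_left (fun k _ => by simp; omega)

-- B's block for one row equals the map of max(a+1,b+1) over the in-row columns
lemma block_eq (a lo hi : Int) :
    ((if min hi a ≥ lo then List.replicate (min hi a - lo + 1).toNat (a + 1) else []) ++
      PySem.List.pyRange (max lo (a + 1) + 1) (hi + 2) 1)
      = (PySem.List.pyRange lo (hi + 1) 1).map (fun b => max (a + 1) (b + 1)) := by
  rcases le_or_gt lo hi with hlh | hlh
  · rcases le_or_gt hi a with hha | hha
    · -- whole row segment is in the constant part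
      rw [if_pos (by omega), PySem.List.pyRange_one_eq_nil (by omega), List.append_nil,
          map_const_pyRange lo (hi + 1) (a + 1) _ (fun b h1 h2 => by omega)]
      congr 1; omega
    · rcases le_or_gt lo a with hla | hla
      · -- split: constant part [lo,a], increasing part [a+1,hi]
        rw [if_pos (by omega),
            PySem.List.pyRange_one_append lo (a + 1) (hi + 1) (by omega) (by omega),
            List.map_append,
            map_const_pyRange lo (a + 1) (a + 1) _ (fun b h1 h2 => by omega)]
        congr 1
        · congr 1; omega
        · rw [show max lo (a + 1) = a + 1 from by omega,
              List.map_congr_left (g := fun b => b + 1) (fun b hb => by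
                rw [PySem.List.mem_pyRange_one] at hb
                show max (a + 1) (b + 1) = b + 1
                omega),
              map_succ_pyRange (a + 1) (hi + 1)]
          congr 1; omega
      · -- whole row segment is in the increasing part
        rw [if_neg (by omega), List.nil_append,
            show max lo (a + 1) = lo from by omega,
            List.map_congr_left (g := fun b => b + 1) (fun b hb => by
              rw [PySem.List.mem_pyRange_one] at hb
              show max (a + 1) (b + 1) = b + 1
              omega),
            map_succ_pyRange lo (hi + 1)]
        congr 1; omega
  · -- empty segment
    rw [if_neg (by omega), List.nil_append,
        PySem.List.pyRange_one_eq_nil (by omega), PySem.List.pyRange_one_eq_nil (by omega),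
        List.map_nil]

-- pvG at a row whose visible columns are [lo,hi] ⊆ [0,n-1] is the flat-index map over them
lemma row_map (n left right a : Int) (hn : 0 < n)
    (hlo : 0 ≤ max (left - a * n) 0) :
    pvG n left right a
      = (PySem.List.pyRange (a * n + max (left - a * n) 0)
          (a * n + min (right - a * n) (n - 1) + 1) 1).map (pvF n) := by
  unfold pvG
  rw [block_eq a (max (left - a * n) 0) (min (right - a * n) (n - 1))]
  have hsh : PySem.List.pyRange (a * n + max (left - a * n) 0)
        (a * n + min (right - a * n) (n - 1) + 1) 1
      = (PySem.List.pyRange (max (left - a * n) 0) (min (right - a * n) (n - 1) + 1) 1).map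
          (fun b => a * n + b) := by
    rw [PySem.List.pyRange_one, PySem.List.pyRange_one, List.map_map]
    have : (a * n + min (right - a * n) (n - 1) + 1 - (a * n + max (left - a * n) 0)).toNat
        = (min (right - a * n) (n - 1) + 1 - max (left - a * n) 0).toNat := by omega
    rw [this]
    exact List.map_congr_left (fun k _ => by simp; omega)
  rw [hsh, List.map_map]
  refine List.map_congr_left (fun b hb => ?_)
  rw [PySem.List.mem_pyRange_one] at hb
  obtain ⟨hd, hm⟩ := divmod_row n a b hn (by omega) (by omega)
  simp only [Function.comp, pvF, hd, hm]
  omega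

-- flatMap of the row blocks over the rows of [left,right] is the flat-index map
lemma rows_eq (n : Int) (hn : 0 < n) : ∀ (k : Nat) (left right : Int),
    PySem.Int.floordiv right n - PySem.Int.floordiv left n = k → left ≤ right →
    (PySem.List.pyRange (PySem.Int.floordiv left n) (PySem.Int.floordiv right n + 1) 1).flatMap
        (pvG n left right)
      = (PySem.List.pyRange left (right + 1) 1).map (pvF n) := by
  intro k
  induction k with
  | zero =>
      intro left right hk hlr
      have hra : PySem.Int.floordiv right n = PySem.Int.floordiv left n := by omega
      have hl := PySem.Int.floordiv_mul_add_mod left n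
      have hr := PySem.Int.floordiv_mul_add_mod right n
      rw [hra] at hr
      have hlm0 := PySem.Int.mod_nonneg left hn
      have hlmn := PySem.Int.mod_lt left hn
      have hrm0 := PySem.Int.mod_nonneg right hn
      have hrmn := PySem.Int.mod_lt right hn
      rw [hra, PySem.List.pyRange_one_singleton, List.flatMap_singleton,
          row_map n left right (PySem.Int.floordiv left n) hn (by omega)]
      rw [show PySem.Int.floordiv left n * n + max (left - PySem.Int.floordiv left n * n) 0 = left
            from by omega,
          show PySem.Int.floordiv left n * n +
              min (right - PySem.Int.floordiv left n * n) (n - 1) + 1 = right + 1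
            from by omega]
  | succ k ih =>
      intro left right hk hlr
      have hl := PySem.Int.floordiv_mul_add_mod left n
      have hr := PySem.Int.floordiv_mul_add_mod right n
      have hlm0 := PySem.Int.mod_nonneg left hn
      have hlmn := PySem.Int.mod_lt left hn
      have hrm0 := PySem.Int.mod_nonneg right hn
      have hrmn := PySem.Int.mod_lt right hn
      have hexp : (PySem.Int.floordiv left n + 1) * n = PySem.Int.floordiv left n * n + n := by
        ring
      have hd' : PySem.Int.floordiv ((PySem.Int.floordiv left n + 1) * n) n
          = PySem.Int.floordiv left n + 1 := by
        have h0 := (divmod_row n (PySem.Int.floordiv left n + 1) 0 hn le_rfl hn).1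
        rwa [add_zero] at h0
      have hfr : PySem.Int.floordiv right n * n ≥ (PySem.Int.floordiv left n + 1) * n := by
        have : PySem.Int.floordiv left n + 1 ≤ PySem.Int.floordiv right n := by omega
        exact mul_le_mul_of_nonneg_right this (le_of_lt hn)
      rw [PySem.List.pyRange_one_cons (by omega), List.flatMap_cons]
      have hblocks : (PySem.List.pyRange (PySem.Int.floordiv left n + 1)
              (PySem.Int.floordiv right n + 1) 1).flatMap (pvG n left right)
          = (PySem.List.pyRange (PySem.Int.floordiv left n + 1)
              (PySem.Int.floordiv right n + 1) 1).flatMap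
              (pvG n ((PySem.Int.floordiv left n + 1) * n) right) := by
        refine List.flatMap_congr (fun a' ha' => ?_)
        rw [PySem.List.mem_pyRange_one] at ha'
        have hmul : (PySem.Int.floordiv left n + 1) * n ≤ a' * n :=
          mul_le_mul_of_nonneg_right ha'.1 (le_of_lt hn)
        unfold pvG
        rw [show max (left - a' * n) 0 = 0 from by omega,
            show max ((PySem.Int.floordiv left n + 1) * n - a' * n) 0 = 0 from by omega]
      have hih := ih ((PySem.Int.floordiv left n + 1) * n) right (by rw [hd']; omega)
        (by omega)
      rw [hd'] at hih
      rw [hblocks, hih, row_map n left right (PySem.Int.floordiv left n) hn (by omega)]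
      rw [show PySem.Int.floordiv left n * n + max (left - PySem.Int.floordiv left n * n) 0 = left
            from by omega,
          show PySem.Int.floordiv left n * n +
              min (right - PySem.Int.floordiv left n * n) (n - 1) + 1
              = (PySem.Int.floordiv left n + 1) * n
            from by omega,
          PySem.List.pyRange_one_append left ((PySem.Int.floordiv left n + 1) * n) (right + 1)
            (by omega) (by omega),
          List.map_append]

-- B's foldl is the flatMap of pvG
lemma alt_eq_flatMap (n left right : Int) :
    solution_alt n left right
      = (PySem.List.pyRange (PySem.Int.floordiv left n) (PySem.Int.floordiv right n + 1) 1).flatMap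
          (pvG n left right) := by
  unfold solution_alt
  have hfun : (fun (answer : List Int) (a : Int) =>
        (if min (min (right - a * n) (n - 1)) a ≥ max (left - a * n) 0 then
            answer ++ List.replicate
              (min (min (right - a * n) (n - 1)) a - max (left - a * n) 0 + 1).toNat (a + 1)
          else answer) ++
          PySem.List.pyRange (max (max (left - a * n) 0) (a + 1) + 1)
            (min (right - a * n) (n - 1) + 2) 1)
      = fun answer a => answer ++ pvG n left right a := by
    funext answer a
    unfold pvG
    split_ifs <;> simp
  show (PySem.List.pyRange _ _ 1).foldl _ [] = _
  rw [hfun, PySem.List.foldl_append_eq_flatMap, List.nil_append]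

-- ===== VERDICT (by name: the statement is the Claim_ definition above) =====
theorem solution_spec : Claim_equal_solution := by
  intro n left right _ hpre
  obtain ⟨hn, hlr⟩ := hpre
  unfold Spec_solution
  have hA : solution n left right = (PySem.List.pyRange left (right + 1) 1).map (pvF n) := by
    unfold solution
    rw [loop_eq_map n hn ((right - left + 1).toNat) left,
        show left + (((right - left + 1).toNat : Nat) : Int) = right + 1 from by omega]
  rcases le_or_gt left right with hle | hgt
  · have hmono : PySem.Int.floordiv left n ≤ PySem.Int.floordiv right n := by
      rw [PySem.Int.floordiv_eq_ediv_of_pos hn, PySem.Int.floordiv_eq_ediv_of_pos hn]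
      exact Int.ediv_le_ediv hn hle
    rw [hA, alt_eq_flatMap,
        rows_eq n hn (PySem.Int.floordiv right n - PySem.Int.floordiv left n).toNat left right
          (by omega) hle]
  · -- left = right + 1 : both sides are empty
    have hleft : left = right + 1 := by omega
    rw [hA, PySem.List.pyRange_one_eq_nil (by omega), List.map_nil, alt_eq_flatMap]
    have hl := PySem.Int.floordiv_mul_add_mod left n
    have hr := PySem.Int.floordiv_mul_add_mod right n
    have hlm0 := PySem.Int.mod_nonneg left hn
    have hlmn := PySem.Int.mod_lt left hn
    have hrm0 := PySem.Int.mod_nonneg right hn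
    have hrmn := PySem.Int.mod_lt right hn
    have hmono : PySem.Int.floordiv right n ≤ PySem.Int.floordiv left n := by
      rw [PySem.Int.floordiv_eq_ediv_of_pos hn, PySem.Int.floordiv_eq_ediv_of_pos hn]
      exact Int.ediv_le_ediv hn (by omega)
    rcases lt_or_eq_of_le hmono with hlt | heq
    · rw [PySem.List.pyRange_one_eq_nil (by omega), List.flatMap_nil]
    · rw [heq] at hr
      rw [heq, PySem.List.pyRange_one_singleton, List.flatMap_singleton]
      unfold pvG
      rw [if_neg (by omega), PySem.List.pyRange_one_eq_nil (by omega), List.nil_append]
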